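/- GENERATED by c/gen_decode.py: decode facts of the image, one per distinct instruction byte string. -/
import UserX.DecodeImage

#decode_all ProgX.Base.Dec
  "0f86a4000000"  -- jbe 1024f2
  "41b800000000"  -- mov r8d,0x0
  "4883c308"  -- add rbx,0x8
  "4889d0"  -- mov rax,rdx
  "488d4301"  -- lea rax,[rbx+0x1]
  "4983ed01"  -- sub r13,0x1
  "4c89c0"  -- mov rax,r8
  "660f28f0"  -- movapd xmm6,xmm0
  "72d5"  -- jb 10145e
  "750b"  -- jne 102cfd
  "7d45"  -- jge 1022a4
  "8d8101fcffff"  -- lea eax,[rcx-0x3ff]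
  "c6870000c000fa"  -- mov BYTE PTR [rdi+0xc00000],0xfa
  "e891f0ffff"  -- call 101da0
  "e8eaf8ffff"  -- call 100059
  "ebde"  -- jmp 102a99
  "f20f58056ddc0300"  -- addsd xmm0,QWORD PTR [rip+0x3dc6d]
  "f20f591dc7d60300"  -- mulsd xmm3,QWORD PTR [rip+0x3d6c7]
  "f20f5e1573da0300"  -- divsd xmm2,QWORD PTR [rip+0x3da73]
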